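-- pv_equiv track=rewrite | github.com/Pragadhishnitt/TransfiNitt_Agent_Smith | ai_interviewer/main.py | get_original_question
-- ===== SOURCE A (Python) =====
-- from typing import List, Optional, Dict, Any, Tuple
--
-- def get_original_question(conversation_history: List[Dict]) -> str:
--     """Get the last main (non-probe) question asked"""
--     for msg in reversed(conversation_history):
--         if msg["role"] == "agent" and not msg.get("is_probe", False):
--             return msg["message"]
--
--     # Fallback to last agent message
--     for msg in reversed(conversation_history):
--         if msg["role"] == "agent":
--             return msg["message"]
--
--     return "the topic we're discussing"
-- ===== SOURCE B (Python) =====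
-- def get_original_question(conversation_history):
--     """Get the last main (non-probe) question asked"""
--     fallback = None
--     for msg in reversed(conversation_history):
--         if msg["role"] == "agent":
--             if not msg.get("is_probe", False):
--                 return msg["message"]
--             if fallback is None:
--                 fallback = msg
--     return fallback["message"] if fallback is not None else "the topic we're discussing"
-- ===== Notes on version B (the rewrite author's own statement) =====
-- stated objective: simpler
-- what changed: Replaces A's two full reversed scans (non-probe agent pass, then agent-fallback pass) by a single reversed pass that returns a non-probe agent message immediately and records the first agent message seen as the fallback candidate.
import Mathlib
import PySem

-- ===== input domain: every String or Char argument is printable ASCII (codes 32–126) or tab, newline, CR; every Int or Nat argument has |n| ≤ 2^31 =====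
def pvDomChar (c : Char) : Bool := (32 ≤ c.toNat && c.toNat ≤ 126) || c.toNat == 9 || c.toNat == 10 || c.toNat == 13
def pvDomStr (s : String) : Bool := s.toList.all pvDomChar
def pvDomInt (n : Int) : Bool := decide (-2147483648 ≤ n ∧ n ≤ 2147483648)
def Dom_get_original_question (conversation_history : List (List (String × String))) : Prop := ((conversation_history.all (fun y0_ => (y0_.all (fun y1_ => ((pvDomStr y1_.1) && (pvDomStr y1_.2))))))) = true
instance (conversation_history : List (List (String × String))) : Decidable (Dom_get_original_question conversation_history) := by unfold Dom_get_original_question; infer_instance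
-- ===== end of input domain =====

-- B replaces A's two full reversed scans by one reversed pass with a recorded fallback candidate (simpler).


-- ===== PORT A =====
-- shared dict-lookup helpers (Python dict built from the pairs; lookups as in the source)
def pvRole (m : List (String × String)) : String := ((PySem.Dict.ofList m).get? "role").getD ""      -- msg["role"]; total here, Pre_ guarantees the key exists
def pvIsProbe (m : List (String × String)) : Bool := ((PySem.Dict.ofList m).get? "is_probe").getD "" != ""  -- truthiness of msg.get("is_probe", False): missing or "" is falsy
def pvMessage (m : List (String × String)) : String := ((PySem.Dict.ofList m).get? "message").getD ""  -- msg["message"]; Pre_ guarantees the key where it is read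

-- first loop of A: first non-probe agent message in the reversed list
def pvLoop1 : List (List (String × String)) → Option String
  | [] => none
  | m :: rest => if pvRole m == "agent" && !pvIsProbe m then some (pvMessage m) else pvLoop1 rest

-- second loop of A: first agent message in the reversed list
def pvLoop2 : List (List (String × String)) → Option String
  | [] => none
  | m :: rest => if pvRole m == "agent" then some (pvMessage m) else pvLoop2 rest

def get_original_question (conversation_history : List (List (String × String))) : String :=
  match pvLoop1 conversation_history.reverse with
  | some s => s
  | none =>
    match pvLoop2 conversation_history.reverse with
    | some s => s
    | none => "the topic we're discussing"

-- ===== PORT B =====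
-- single reversed pass carrying the fallback candidate (the first agent message object seen)
def pvLoopB : List (List (String × String)) → Option (List (String × String)) → String
  | [], fb =>
    match fb with
    | some m => pvMessage m
    | none => "the topic we're discussing"
  | m :: rest, fb =>
    if pvRole m == "agent" then
      if !pvIsProbe m then pvMessage m
      else pvLoopB rest (if fb.isNone then some m else fb)
    else pvLoopB rest fb

def get_original_question_alt (conversation_history : List (List (String × String))) : String :=
  pvLoopB conversation_history.reverse none

-- ===== PRECONDITION & SPEC =====
-- Pre_ excludes exactly the histories on which A raises KeyError: scanning in reverse, A stops at
-- the first message that either lacks "role" or is a non-probe agent message; the stop must have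
-- "role" and "message"; if no such stop exists, the last agent message (if any) must have "message".
def pvStop (m : List (String × String)) : Bool :=
  !(PySem.Dict.ofList m).contains "role" || (pvRole m == "agent" && !pvIsProbe m)
def pvPreB (conversation_history : List (List (String × String))) : Bool :=
  match conversation_history.reverse.find? pvStop with
  | some m => (PySem.Dict.ofList m).contains "role" && (PySem.Dict.ofList m).contains "message"
  | none =>
    match conversation_history.reverse.find? (fun m => pvRole m == "agent") with
    | some m => (PySem.Dict.ofList m).contains "message"
    | none => true
def Pre_get_original_question (conversation_history : List (List (String × String))) : Prop :=
  pvPreB conversation_history = true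
instance (conversation_history : List (List (String × String))) : Decidable (Pre_get_original_question conversation_history) := by unfold Pre_get_original_question; infer_instance

def pvWitness_get_original_question : (List (List (String × String))) :=
  [[("role", "user"), ("message", "hi")],
   [("role", "agent"), ("message", "What is X?")],
   [("role", "agent"), ("message", "probe?"), ("is_probe", "yes")]]

def Spec_get_original_question (conversation_history : List (List (String × String))) (out : String) : Prop := out = get_original_question_alt conversation_history
instance (conversation_history : List (List (String × String))) (out : String) : Decidable (Spec_get_original_question conversation_history out) := by unfold Spec_get_original_question; infer_instance

-- ===== CLAIM (what is proved, stated in full; the proofs are below) =====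
def Claim_equal_get_original_question : Prop := ∀ (conversation_history : List (List (String × String))), Dom_get_original_question conversation_history → Pre_get_original_question conversation_history → Spec_get_original_question conversation_history (get_original_question conversation_history)

-- ===== LEMMAS AND PROOFS =====
-- The one-pass loop equals: first non-probe agent message; else the carried fallback; else the
-- first agent message of the remaining list; else the default.  (Holds unconditionally.)
theorem pvLoopB_eq : ∀ (l : List (List (String × String))) (fb : Option (List (String × String))),
    pvLoopB l fb =
      match pvLoop1 l with
      | some s => s
      | none =>
        match fb with
        | some m => pvMessage m
        | none =>
          match pvLoop2 l with
          | some s => s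
          | none => "the topic we're discussing" := by
  intro l
  induction l with
  | nil => intro fb; cases fb <;> simp [pvLoopB, pvLoop1, pvLoop2]
  | cons m rest ih =>
    intro fb
    by_cases hag : pvRole m == "agent"
    · by_cases hpr : !pvIsProbe m
      · simp [pvLoopB, pvLoop1, hag, hpr]
      · cases fb with
        | none => simp [pvLoopB, pvLoop1, pvLoop2, hag, hpr, ih]
        | some m0 => simp [pvLoopB, pvLoop1, hag, hpr, ih]
    · simp [pvLoopB, pvLoop1, pvLoop2, hag, ih]

-- ===== VERDICT (by name: the statement is the Claim_ definition above) =====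
theorem get_original_question_spec : Claim_equal_get_original_question := by
  intro h _ _
  unfold Spec_get_original_question get_original_question get_original_question_alt
  rw [pvLoopB_eq]
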